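-- pv_equiv track=rewrite | github.com/ScottCTD/bill_helper | backend/cli/rendering_support.py | unique_short_ids
-- ===== SOURCE A (Python) =====
-- from typing import Any
--
-- _SHORT_ID_LENGTH = 8
--
-- def unique_short_ids(ids: Any) -> dict[str, str]:
--     full_ids = [str(value) for value in ids if isinstance(value, str) and value]
--     counts: dict[str, int] = {}
--     for value in full_ids:
--         counts[value[:_SHORT_ID_LENGTH]] = counts.get(value[:_SHORT_ID_LENGTH], 0) + 1
--     return {
--         value: value if counts[value[:_SHORT_ID_LENGTH]] > 1 else value[:_SHORT_ID_LENGTH]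
--         for value in full_ids
--     }
-- ===== SOURCE B (Python) =====
-- from typing import Any
--
-- _SHORT_ID_LENGTH = 8
--
-- def unique_short_ids(ids: Any) -> dict[str, str]:
--     # Single pass with back-patching: remember the first owner of each prefix;
--     # on the first collision, patch that owner's entry back to its full id.
--     result: dict[str, str] = {}
--     first: dict[str, Any] = {}  # prefix -> first full id, or None once collided
--     for value in ids:
--         if not (isinstance(value, str) and value):
--             continue
--         value = str(value)
--         prefix = value[:_SHORT_ID_LENGTH]
--         if prefix not in first:
--             first[prefix] = value
--             result[value] = prefix
--         else:
--             w = first[prefix]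
--             if w is not None:
--                 result[w] = w
--                 first[prefix] = None
--             result[value] = value
--     return result
-- ===== Notes on version B (the rewrite author's own statement) =====
-- stated objective: alternative
-- what changed: B replaces A's two passes over the id list (count prefixes, then rebuild every entry from the counts) by a single pass that maintains a prefix->first-owner map and back-patches the first owner's entry when its prefix first collides.
import Mathlib
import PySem

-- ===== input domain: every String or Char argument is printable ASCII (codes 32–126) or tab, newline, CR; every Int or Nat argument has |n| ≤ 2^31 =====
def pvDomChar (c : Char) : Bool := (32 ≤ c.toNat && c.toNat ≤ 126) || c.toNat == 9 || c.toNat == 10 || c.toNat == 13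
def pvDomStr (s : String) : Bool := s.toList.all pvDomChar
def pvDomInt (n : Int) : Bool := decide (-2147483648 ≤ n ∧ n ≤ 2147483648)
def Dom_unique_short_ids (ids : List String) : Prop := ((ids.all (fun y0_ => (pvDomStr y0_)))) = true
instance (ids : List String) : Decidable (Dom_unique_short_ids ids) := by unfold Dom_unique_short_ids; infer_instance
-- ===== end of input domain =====

-- B replaces A's two passes (count prefixes, then rebuild from the counts) by a single pass that
-- remembers each prefix's first owner and back-patches that owner's entry on the first collision;
-- same asymptotic cost, different algorithm.


-- ===== PORT A =====
-- value[:_SHORT_ID_LENGTH]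
def pvShort (v : String) : String := PySem.Str.slice v none (some 8)

def unique_short_ids (ids : List String) : List (String × String) :=
  -- [str(value) for value in ids if isinstance(value, str) and value]; str() is the identity on str
  let full_ids := ids.filter (fun v => !(v == ""))
  -- counts[value[:8]] = counts.get(value[:8], 0) + 1
  let counts : PySem.Dict String Int :=
    full_ids.foldl (fun d v => d.insert (pvShort v) (d.getD (pvShort v) 0 + 1)) PySem.Dict.empty
  -- counts[value[:8]] : the key is always present here, so getD 0 is exact
  (full_ids.foldl (fun r v =>
      r.insert v (if 1 < counts.getD (pvShort v) 0 then v else pvShort v)) PySem.Dict.empty).items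

-- ===== PORT B =====
-- loop body of Source B (one iteration, for a non-empty string value)
def pvStepB (st : PySem.Dict String String × PySem.Dict String (Option String)) (v : String) :
    PySem.Dict String String × PySem.Dict String (Option String) :=
  let p := pvShort v
  match st.2.get? p with
  | none => (st.1.insert v p, st.2.insert p (some v))                    -- first[p] = v; result[v] = p
  | some (some w) => ((st.1.insert w w).insert v v, st.2.insert p none)  -- result[w] = w; first[p] = None; result[v] = v
  | some none => (st.1.insert v v, st.2)                                 -- result[v] = v

def unique_short_ids_alt (ids : List String) : List (String × String) :=
  (ids.foldl (fun st v => if v == "" then st else pvStepB st v)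
    (PySem.Dict.empty, PySem.Dict.empty)).1.items

-- ===== PRECONDITION & SPEC =====
def Spec_unique_short_ids (ids : List String) (out : List (String × String)) : Prop := out = unique_short_ids_alt ids
instance (ids : List String) (out : List (String × String)) : Decidable (Spec_unique_short_ids ids out) := by unfold Spec_unique_short_ids; infer_instance

-- ===== CLAIM (what is proved, stated in full; the proofs are below) =====
def Claim_equal_unique_short_ids : Prop := ∀ (ids : List String), Dom_unique_short_ids ids → Spec_unique_short_ids ids (unique_short_ids ids)

-- ===== LEMMAS AND PROOFS =====

-- number of occurrences of prefix p among the prefixes of l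
def pvCnt (l : List String) (p : String) : Nat := (l.map pvShort).count p

-- the final value A's dict assigns to key k, with counts taken over l
def pvVal (l : List String) (k : String) : String :=
  if 1 < pvCnt l (pvShort k) then k else pvShort k

-- closed form for B's `first` dict lookups after processing l
def pvFirst (l : List String) (q : String) : Option (Option String) :=
  if pvCnt l q = 0 then none
  else some (if pvCnt l q = 1 then l.find? (fun k => pvShort k == q) else none)

lemma pvCnt_zero {l : List String} {p : String} (h : pvCnt l p = 0) :
    ∀ k ∈ l, pvShort k ≠ p := by
  intro k hk
  simp only [pvCnt, List.count_eq_zero, List.mem_map] at h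
  exact fun he => h ⟨k, hk, he⟩

lemma pvCnt_append_singleton (l : List String) (v q : String) :
    pvCnt (l ++ [v]) q = pvCnt l q + (if pvShort v = q then 1 else 0) := by
  simp [pvCnt, List.count_append, List.count_singleton, beq_iff_eq]

lemma pvVal_append_of_ne {l : List String} {v k : String} (h : pvShort k ≠ pvShort v) :
    pvVal (l ++ [v]) k = pvVal l k := by
  unfold pvVal
  rw [pvCnt_append_singleton]
  simp [show pvShort v ≠ pvShort k from fun he => h he.symm]

lemma pvCnt_one {l : List String} {p : String} (h : pvCnt l p = 1) :
    ∃ w0, l.find? (fun k => pvShort k == p) = some w0 ∧ pvShort w0 = p ∧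
      ∀ k ∈ l, pvShort k = p → k = w0 := by
  induction l with
  | nil => simp [pvCnt] at h
  | cons x t ih =>
    by_cases hx : pvShort x = p
    · have hcnt : pvCnt (x :: t) p = pvCnt t p + 1 := by
        simp [pvCnt, hx]
      have ht : pvCnt t p = 0 := by omega
      refine ⟨x, by simp [hx], hx, ?_⟩
      intro k hk hkp
      rw [List.mem_cons] at hk
      rcases hk with hk | hk
      · exact hk
      · exact absurd hkp (pvCnt_zero ht k hk)
    · have hcnt : pvCnt (x :: t) p = pvCnt t p := by
        simp [pvCnt, hx]
      have ht : pvCnt t p = 1 := by omega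
      obtain ⟨w0, hf, hw, hu⟩ := ih ht
      refine ⟨w0, by simp [hx, hf], hw, ?_⟩
      intro k hk hkp
      rw [List.mem_cons] at hk
      rcases hk with hk | hk
      · exact absurd (hk ▸ hkp) hx
      · exact hu k hk hkp

lemma pvFirst_append_of_ne {l : List String} {v q : String} (h : pvShort v ≠ q) :
    pvFirst (l ++ [v]) q = pvFirst l q := by
  have hc : pvCnt (l ++ [v]) q = pvCnt l q := by
    rw [pvCnt_append_singleton]; simp [h]
  unfold pvFirst
  rw [hc]
  by_cases h1 : pvCnt l q = 1
  · obtain ⟨w0, hf, _, _⟩ := pvCnt_one h1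
    rw [List.find?_append, hf]
    rfl
  · by_cases h0 : pvCnt l q = 0
    · rw [if_pos h0, if_pos h0]
    · rw [if_neg h0, if_neg h0, if_neg h1, if_neg h1]

-- inserting (v, u) into a dict whose items are an image of a key set
lemma items_insert_fun (d : PySem.Dict String String) (l : List String) (f : String → String)
    (hd : d.items = (PySem.Set.ofList l).map (fun k => (k, f k))) (v u : String) :
    (d.insert v u).items
      = (PySem.Set.ofList (l ++ [v])).map (fun k => (k, if k = v then u else f k)) := by
  have hkeys : d.keys = PySem.Set.ofList l := by
    simp only [PySem.Dict.keys, hd, List.map_map]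
    rw [show ((fun x : String × String => x.1) ∘ fun k : String => (k, f k)) = id from rfl,
      List.map_id]
  rw [PySem.Set.ofList_append_singleton, PySem.Set.add_eq_ite]
  by_cases hv : v ∈ PySem.Set.ofList l
  · have hc : d.contains v = true := by
      rw [PySem.Dict.contains_eq_decide_mem_keys, hkeys]; simpa using hv
    rw [PySem.Dict.items_insert_of_contains _ _ hc, hd, List.map_map, if_pos hv]
    refine List.map_congr_left ?_
    intro k _
    by_cases hk : k = v
    · simp [Function.comp, hk]
    · simp [Function.comp, hk]
  · have hc : d.contains v = false := by
      rw [PySem.Dict.contains_eq_decide_mem_keys, hkeys]; simpa using hv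
    rw [PySem.Dict.items_insert_of_not_contains _ _ hc, hd, if_neg hv, List.map_append]
    congr 1
    · refine List.map_congr_left ?_
      intro k hk
      have : k ≠ v := fun he => hv (he ▸ hk)
      simp [this]
    · simp

-- A's rebuild loop: inserted value depends only on the key
lemma dictOf_items (f : String → String) (l : List String) :
    (l.foldl (fun r v => r.insert v (f v)) PySem.Dict.empty).items
      = (PySem.Set.ofList l).map (fun k => (k, f k)) := by
  induction l using List.reverseRecOn with
  | nil => rfl
  | append_singleton l v ih =>
    rw [List.foldl_append]
    simp only [List.foldl_cons, List.foldl_nil]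
    rw [items_insert_fun _ l f ih v (f v)]
    refine List.map_congr_left ?_
    intro k _
    by_cases hk : k = v
    · simp [hk]
    · simp [hk]

-- main invariant for B's single pass
lemma pvInvariant (l : List String) :
    (l.foldl pvStepB (PySem.Dict.empty, PySem.Dict.empty)).1.items
        = (PySem.Set.ofList l).map (fun k => (k, pvVal l k)) ∧
    ∀ q, (l.foldl pvStepB (PySem.Dict.empty, PySem.Dict.empty)).2.get? q = pvFirst l q := by
  induction l using List.reverseRecOn with
  | nil =>
    refine ⟨rfl, fun q => ?_⟩
    simp [pvFirst, pvCnt, PySem.Dict.get?_empty]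
  | append_singleton l v ih =>
    obtain ⟨ih1, ih2⟩ := ih
    rw [List.foldl_append]
    simp only [List.foldl_cons, List.foldl_nil]
    set st := l.foldl pvStepB (PySem.Dict.empty, PySem.Dict.empty) with hst
    have hget := ih2 (pvShort v)
    by_cases hc0 : pvCnt l (pvShort v) = 0
    · -- prefix never seen: first[p] = v, result[v] = p
      have hget' : st.2.get? (pvShort v) = none := by
        rw [hget]; simp [pvFirst, hc0]
      have hstep : pvStepB st v = (st.1.insert v (pvShort v), st.2.insert (pvShort v) (some v)) := by
        simp only [pvStepB, hget']
      rw [hstep]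
      constructor
      · rw [items_insert_fun st.1 l (pvVal l) ih1 v (pvShort v)]
        refine List.map_congr_left ?_
        intro k hk
        rw [PySem.Set.mem_ofList] at hk
        by_cases hkv : k = v
        · subst hkv
          have hvv : pvVal (l ++ [k]) k = pvShort k := by
            unfold pvVal
            rw [pvCnt_append_singleton, hc0]
            simp
          rw [if_pos rfl, hvv]
        · have hkl : k ∈ l := by
            rcases List.mem_append.mp hk with h | h
            · exact h
            · exact absurd (List.mem_singleton.mp h) hkv
          have hne : pvShort k ≠ pvShort v := pvCnt_zero hc0 k hkl
          rw [if_neg hkv, pvVal_append_of_ne hne]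
      · intro q
        rw [PySem.Dict.get?_insert]
        by_cases hq : q = pvShort v
        · subst hq
          have hfl : l.find? (fun k => pvShort k == pvShort v) = none :=
            List.find?_eq_none.mpr (fun k hk => by simpa using pvCnt_zero hc0 k hk)
          simp [pvFirst, pvCnt_append_singleton, hc0, List.find?_append, hfl, List.find?]
        · rw [if_neg hq, ih2 q, pvFirst_append_of_ne (fun he => hq he.symm)]
    · by_cases hc1 : pvCnt l (pvShort v) = 1
      · -- first collision: back-patch the first owner w0
        obtain ⟨w0, hf, hw0p, huniq⟩ := pvCnt_one hc1
        have hw0l : w0 ∈ l := List.mem_of_find?_eq_some hf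
        have hget' : st.2.get? (pvShort v) = some (some w0) := by
          rw [hget]; simp [pvFirst, hc1, hf]
        have hstep : pvStepB st v
            = ((st.1.insert w0 w0).insert v v, st.2.insert (pvShort v) none) := by
          simp only [pvStepB, hget']
        rw [hstep]
        constructor
        · have h1 := items_insert_fun st.1 l (pvVal l) ih1 w0 w0
          have hsame : PySem.Set.ofList (l ++ [w0]) = PySem.Set.ofList l := by
            rw [PySem.Set.ofList_append_singleton,
              PySem.Set.add_of_mem (by simpa [PySem.Set.mem_ofList] using hw0l)]
          rw [hsame] at h1
          rw [items_insert_fun _ l _ h1 v v]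
          refine List.map_congr_left ?_
          intro k hk
          rw [PySem.Set.mem_ofList] at hk
          by_cases hkv : k = v
          · subst hkv
            have hvv : pvVal (l ++ [k]) k = k := by
              unfold pvVal
              rw [pvCnt_append_singleton, hc1]
              simp
            rw [if_pos rfl, hvv]
          · have hkl : k ∈ l := by
              rcases List.mem_append.mp hk with h | h
              · exact h
              · exact absurd (List.mem_singleton.mp h) hkv
            rw [if_neg hkv]
            by_cases hkw : k = w0
            · subst hkw
              have hvw : pvVal (l ++ [v]) k = k := by
                unfold pvVal
                rw [pvCnt_append_singleton, hw0p, hc1]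
                simp
              rw [if_pos rfl, hvw]
            · have hne : pvShort k ≠ pvShort v := fun he => hkw (huniq k hkl he)
              rw [if_neg hkw, pvVal_append_of_ne hne]
        · intro q
          rw [PySem.Dict.get?_insert]
          by_cases hq : q = pvShort v
          · subst hq
            simp [pvFirst, pvCnt_append_singleton, hc1]
          · rw [if_neg hq, ih2 q, pvFirst_append_of_ne (fun he => hq he.symm)]
      · -- already collided: every member maps to itself
        have hget' : st.2.get? (pvShort v) = some none := by
          rw [hget]; simp [pvFirst, hc0, hc1]
        have hstep : pvStepB st v = (st.1.insert v v, st.2) := by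
          simp only [pvStepB, hget']
        rw [hstep]
        constructor
        · rw [items_insert_fun st.1 l (pvVal l) ih1 v v]
          refine List.map_congr_left ?_
          intro k hk
          rw [PySem.Set.mem_ofList] at hk
          by_cases hkv : k = v
          · subst hkv
            have hvv : pvVal (l ++ [k]) k = k := by
              unfold pvVal
              rw [pvCnt_append_singleton]
              have hgt : 1 < pvCnt l (pvShort k) + (if pvShort k = pvShort k then 1 else 0) := by
                rw [if_pos rfl]; omega
              rw [if_pos hgt]
            rw [if_pos rfl, hvv]
          · have hkl : k ∈ l := by
              rcases List.mem_append.mp hk with h | h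
              · exact h
              · exact absurd (List.mem_singleton.mp h) hkv
            rw [if_neg hkv]
            by_cases hkp : pvShort k = pvShort v
            · have hv1 : pvVal l k = k := by
                unfold pvVal; rw [hkp]
                have hgt : 1 < pvCnt l (pvShort v) := by omega
                rw [if_pos hgt]
              have hv2 : pvVal (l ++ [v]) k = k := by
                unfold pvVal
                rw [pvCnt_append_singleton, hkp]
                have hgt : 1 < pvCnt l (pvShort v) + (if pvShort v = pvShort v then 1 else 0) := by
                  rw [if_pos rfl]; omega
                rw [if_pos hgt]
              rw [hv1, hv2]
            · rw [pvVal_append_of_ne hkp]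
        · intro q
          by_cases hq : q = pvShort v
          · subst hq
            rw [ih2]
            have h2 : ¬ pvCnt (l ++ [v]) (pvShort v) = 0 := by
              rw [pvCnt_append_singleton, if_pos rfl]; omega
            have h3 : ¬ pvCnt (l ++ [v]) (pvShort v) = 1 := by
              rw [pvCnt_append_singleton, if_pos rfl]; omega
            simp [pvFirst, hc0, hc1, h2, h3]
          · rw [ih2 q, pvFirst_append_of_ne (fun he => hq he.symm)]

lemma foldl_skip_empty (l : List String)
    (st : PySem.Dict String String × PySem.Dict String (Option String)) :
    l.foldl (fun st v => if v == "" then st else pvStepB st v) st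
      = (l.filter (fun v => !(v == ""))).foldl pvStepB st := by
  induction l generalizing st with
  | nil => rfl
  | cons x t ih =>
    simp only [List.foldl_cons, List.filter_cons]
    by_cases hx : (x == "") = true
    · rw [if_pos hx]
      have hb : (!(x == "")) = false := by simp [hx]
      rw [hb]
      simp only [Bool.false_eq_true, if_false]
      exact ih st
    · rw [if_neg hx]
      have hb : (!(x == "")) = true := by simp at hx ⊢; exact hx
      rw [hb]
      simp only [if_true, List.foldl_cons]
      exact ih (pvStepB st x)

lemma counts_getD (l : List String) (p : String) :
    (l.foldl (fun d v => d.insert (pvShort v) (d.getD (pvShort v) 0 + 1))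
        (PySem.Dict.empty : PySem.Dict String Int)).getD p 0 = (pvCnt l p : Int) := by
  have h : l.foldl (fun d v => d.insert (pvShort v) (d.getD (pvShort v) 0 + 1))
        (PySem.Dict.empty : PySem.Dict String Int)
      = (l.map pvShort).foldl (fun d x => d.insert x (d.getD x 0 + 1)) PySem.Dict.empty := by
    rw [List.foldl_map]
  rw [h, PySem.Dict.getD_foldl_insert_add_one]
  simp [pvCnt, PySem.Dict.getD_empty]

-- ===== VERDICT (by name: the statement is the Claim_ definition above) =====
theorem unique_short_ids_spec : Claim_equal_unique_short_ids := by
  intro ids _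
  unfold Spec_unique_short_ids unique_short_ids unique_short_ids_alt
  simp only []
  rw [foldl_skip_empty]
  set full := ids.filter (fun v => !(v == "")) with hfull
  have hA : (full.foldl (fun r v =>
      r.insert v (if 1 < (full.foldl (fun d v => d.insert (pvShort v) (d.getD (pvShort v) 0 + 1))
        (PySem.Dict.empty : PySem.Dict String Int)).getD (pvShort v) 0 then v else pvShort v))
      PySem.Dict.empty)
      = full.foldl (fun r v => r.insert v (pvVal full v)) PySem.Dict.empty := by
    refine PySem.List.foldl_congr_mem full _ _ _ ?_
    intro r v _
    congr 1
    rw [counts_getD]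
    unfold pvVal
    by_cases h : 1 < pvCnt full (pvShort v)
    · rw [if_pos (by exact_mod_cast h), if_pos h]
    · rw [if_neg (by exact_mod_cast h), if_neg h]
  rw [hA, dictOf_items, (pvInvariant full).1]
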